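-- pv_equiv track=rewrite | github.com/ericharley/AdventOfCode | 2015/17/b.py | f
-- ===== SOURCE A (Python) =====
-- def f(c,v,k):
--  if v == 0 and k == 0:
--    return 1
--
--  if (v < 0) or (v == 0 and k != 0) or (v > 0 and c == []):
--    return 0
--
--  else:
--    first,rest = c[0],c[1:]
--    return f(rest, v-first, k-1) + f(rest, v, k)
-- ===== SOURCE B (Python) =====
-- def f(c, v, k):
--     # Forward DP: sweep the containers once, keeping a dict that maps each
--     # reachable state (remaining volume, remaining count) to the number of
--     # ways to reach it; equal states are merged instead of being explored
--     # separately as in the naive branching recursion.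
--     if v == 0 and k == 0:
--         return 1
--     if v < 0 or (v == 0 and k != 0):
--         return 0
--     ans = 0
--     states = {(v, k): 1}  # invariant: every stored remaining volume is > 0
--     for first in c:
--         nxt = {}
--         for (rv, rk), cnt in states.items():
--             for nv, nk in ((rv - first, rk - 1), (rv, rk)):
--                 if nv == 0 and nk == 0:
--                     ans += cnt
--                 elif nv > 0:
--                     nxt[(nv, nk)] = nxt.get((nv, nk), 0) + cnt
--         states = nxt
--     return ans
-- ===== Notes on version B (the rewrite author's own statement) =====
-- stated objective: alternative
-- what changed: Replaces the naive exponential branching recursion by a single forward sweep over the containers that maintains a dict from (remaining volume, remaining count) states to path counts, merging equal states.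
import Mathlib
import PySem

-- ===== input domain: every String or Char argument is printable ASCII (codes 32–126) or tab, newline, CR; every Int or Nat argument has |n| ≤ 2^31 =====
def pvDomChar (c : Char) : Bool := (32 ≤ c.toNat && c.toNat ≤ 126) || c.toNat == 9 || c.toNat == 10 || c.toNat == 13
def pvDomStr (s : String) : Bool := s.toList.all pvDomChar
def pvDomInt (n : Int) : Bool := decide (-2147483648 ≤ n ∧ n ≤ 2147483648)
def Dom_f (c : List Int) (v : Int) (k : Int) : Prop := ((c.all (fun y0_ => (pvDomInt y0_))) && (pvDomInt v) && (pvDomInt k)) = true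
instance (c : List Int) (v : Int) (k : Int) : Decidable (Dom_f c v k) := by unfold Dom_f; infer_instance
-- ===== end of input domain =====

-- B: instead of A's naive branching recursion, one forward sweep over the containers
-- keeping a dict of (remaining volume, remaining count) states with path counts (equal states merged).


-- ===== PORT A =====
def f : List Int → Int → Int → Int
  | c, v, k =>
    if v = 0 ∧ k = 0 then 1
    else if v < 0 ∨ (v = 0 ∧ k ≠ 0) ∨ (v > 0 ∧ c = []) then 0
    else
      match c with
      | [] => 0  -- unreachable: when c = [] one of the branches above returned
      | first :: rest => f rest (v - first) (k - 1) + f rest v k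

-- ===== PORT B =====
-- nxt[(nv, nk)] = nxt.get((nv, nk), 0) + cnt
def fBump (d : PySem.Dict (Int × Int) Int) (key : Int × Int) (cnt : Int) :
    PySem.Dict (Int × Int) Int :=
  d.insert key (d.getD key 0 + cnt)

-- one iteration of the inner 'for nv, nk in …' loop body
def fHandle (acc : Int × PySem.Dict (Int × Int) Int) (nv nk cnt : Int) :
    Int × PySem.Dict (Int × Int) Int :=
  if nv = 0 ∧ nk = 0 then (acc.1 + cnt, acc.2)
  else if 0 < nv then (acc.1, fBump acc.2 (nv, nk) cnt)
  else acc

-- one iteration of the outer 'for first in c' loop: rebuilds nxt from states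
def fStep (first : Int) (st : Int × PySem.Dict (Int × Int) Int) :
    Int × PySem.Dict (Int × Int) Int :=
  st.2.items.foldl
    (fun acc p => fHandle (fHandle acc (p.1.1 - first) (p.1.2 - 1) p.2) p.1.1 p.1.2 p.2)
    (st.1, PySem.Dict.empty)

def f_alt (c : List Int) (v : Int) (k : Int) : Int :=
  if v = 0 ∧ k = 0 then 1
  else if v < 0 ∨ (v = 0 ∧ k ≠ 0) then 0
  else (c.foldl (fun st first => fStep first st) (0, PySem.Dict.mk [((v, k), 1)])).1

-- ===== PRECONDITION & SPEC =====
def Spec_f (c : List Int) (v : Int) (k : Int) (out : Int) : Prop := out = f_alt c v k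
instance (c : List Int) (v : Int) (k : Int) (out : Int) : Decidable (Spec_f c v k out) := by unfold Spec_f; infer_instance

-- ===== CLAIM (what is proved, stated in full; the proofs are below) =====
def Claim_equal_f : Prop := ∀ (c : List Int) (v : Int) (k : Int), Dom_f c v k → Spec_f c v k (f c v k)

-- ===== LEMMAS AND PROOFS =====

-- the weighted count of A-values represented by a state dict
def fSum (rem : List Int) (d : PySem.Dict (Int × Int) Int) : Int :=
  (d.items.map (fun p => p.2 * f rem p.1.1 p.1.2)).sum

theorem f_pos_cons (first : Int) (rest : List Int) (rv rk : Int) (h : 0 < rv) :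
    f (first :: rest) rv rk = f rest (rv - first) (rk - 1) + f rest rv rk := by
  rw [f.eq_def]
  simp [show ¬ rv < 0 by omega, show rv ≠ 0 by omega]

theorem f_zero_zero (rem : List Int) : f rem 0 0 = 1 := by rw [f.eq_def]; simp

theorem f_dead (rem : List Int) (nv nk : Int) (h : nv < 0 ∨ (nv = 0 ∧ nk ≠ 0)) :
    f rem nv nk = 0 := by
  rw [f.eq_def]
  rcases h with h | ⟨h0, hk⟩
  · simp [show ¬(nv = 0 ∧ nk = 0) by omega, h]
  · subst h0; simp [hk]

theorem f_nil_pos (rv rk : Int) (h : 0 < rv) : f [] rv rk = 0 := by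
  rw [f.eq_def]; simp [show ¬(rv = 0 ∧ rk = 0) by omega, h, show ¬ rv < 0 by omega]

theorem fSum_nil (d : PySem.Dict (Int × Int) Int)
    (hpos : ∀ p ∈ d.items, 0 < p.1.1) : fSum [] d = 0 := by
  unfold fSum
  apply List.sum_eq_zero
  intro x hx
  simp only [List.mem_map] at hx
  obtain ⟨p, hp, rfl⟩ := hx
  rw [f_nil_pos _ _ (hpos p hp), mul_zero]

-- inserting (getD + cnt) at key s shifts the weighted sum by cnt * f rem s
theorem sum_map_replace (l : List ((Int × Int) × Int)) (s : Int × Int) (w0 w : Int)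
    (h : Int × Int → Int) (hnd : (l.map (·.1)).Nodup) (hmem : (s, w0) ∈ l) :
    ((l.map (fun p => if p.1 == s then (s, w) else p)).map (fun p => p.2 * h p.1)).sum
      = (l.map (fun p => p.2 * h p.1)).sum + (w - w0) * h s := by
  induction l with
  | nil => simp at hmem
  | cons q t ih =>
    rw [List.map_cons, List.nodup_cons] at hnd
    obtain ⟨hq1, hq2⟩ := hnd
    by_cases hq : q.1 = s
    · have hqe : q = (s, w0) := by
        rcases List.mem_cons.mp hmem with h1 | h2
        · exact h1.symm
        · exact absurd (show q.1 ∈ t.map (·.1) by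
            rw [hq]; exact List.mem_map_of_mem h2) hq1
      subst hqe
      have ht : t.map (fun p => if p.1 == s then (s, w) else p) = t := by
        conv_rhs => rw [← List.map_id t]
        apply List.map_congr_left
        intro x hx
        have hxs : x.1 ≠ s := by
          intro he
          have hs : s ∈ t.map (·.1) := by rw [← he]; exact List.mem_map_of_mem hx
          exact hq1 hs
        simp [hxs]
      simp only [List.map_cons, ht, List.sum_cons, beq_self_eq_true, if_true]
      ring
    · have hmem' : (s, w0) ∈ t := by
        rcases List.mem_cons.mp hmem with h1 | h2
        · exact absurd (by rw [← h1]) hq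
        · exact h2
      simp only [List.map_cons, List.sum_cons, show (q.1 == s) = false by simp [hq],
        Bool.false_eq_true, if_false, ih hq2 hmem']
      ring

theorem fSum_bump (rem : List Int) (d : PySem.Dict (Int × Int) Int)
    (hnd : d.keys.Nodup) (s : Int × Int) (cnt : Int) :
    fSum rem (fBump d s cnt) = fSum rem d + cnt * f rem s.1 s.2 := by
  unfold fSum fBump
  by_cases hc : d.contains s = true
  · obtain ⟨v, hv⟩ : ∃ v, d.get? s = some v := by
      have := PySem.Dict.contains_eq_isSome_get? d s
      rw [hc] at this
      exact Option.isSome_iff_exists.mp this.symm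
    have hget : d.getD s 0 = v := PySem.Dict.getD_of_get?_eq_some d 0 hv
    have hmem : (s, v) ∈ d.items := PySem.Dict.mem_items_of_get?_eq_some d hv
    rw [PySem.Dict.items_insert_of_contains _ _ hc,
      sum_map_replace d.items s v (d.getD s 0 + cnt) (fun q => f rem q.1 q.2)
        (by simpa [PySem.Dict.keys] using hnd) hmem]
    rw [hget]; ring
  · rw [PySem.Dict.items_insert_of_not_contains _ _ (by simpa using hc),
      PySem.Dict.getD_of_not_contains d 0 (by simpa using hc)]
    simp

theorem fBump_keys_nodup (d : PySem.Dict (Int × Int) Int) (s : Int × Int) (cnt : Int)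
    (hnd : d.keys.Nodup) : (fBump d s cnt).keys.Nodup := by
  exact PySem.Dict.nodup_keys_insert d s _ hnd

theorem fHandle_spec (rem : List Int) (acc : Int × PySem.Dict (Int × Int) Int)
    (nv nk cnt : Int) (hnd : acc.2.keys.Nodup) :
    (fHandle acc nv nk cnt).1 + fSum rem (fHandle acc nv nk cnt).2
      = acc.1 + fSum rem acc.2 + cnt * f rem nv nk
    ∧ (fHandle acc nv nk cnt).2.keys.Nodup
    ∧ (∀ p ∈ (fHandle acc nv nk cnt).2.items, p ∈ acc.2.items ∨ 0 < p.1.1) := by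
  unfold fHandle
  split_ifs with h00 hpos
  · refine ⟨?_, hnd, fun p hp => Or.inl hp⟩
    show acc.1 + cnt + fSum rem acc.2 = acc.1 + fSum rem acc.2 + cnt * f rem nv nk
    obtain ⟨rfl, rfl⟩ := h00
    rw [f_zero_zero]; ring
  · refine ⟨?_, fBump_keys_nodup _ _ _ hnd, ?_⟩
    · show acc.1 + fSum rem (fBump acc.2 (nv, nk) cnt)
          = acc.1 + fSum rem acc.2 + cnt * f rem (nv, nk).1 (nv, nk).2
      rw [fSum_bump rem acc.2 hnd (nv, nk) cnt]; ring
    · intro p hp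
      rcases (PySem.Dict.mem_items_insert acc.2 (nv, nk) (acc.2.getD (nv, nk) 0 + cnt) p).mp hp
          with h1 | h2
      · right; rw [h1]; exact hpos
      · exact Or.inl h2.1
  · refine ⟨?_, hnd, fun p hp => Or.inl hp⟩
    show acc.1 + fSum rem acc.2 = acc.1 + fSum rem acc.2 + cnt * f rem nv nk
    rw [f_dead rem nv nk (by omega)]; ring

-- the inner fold over d.items: processes each state, accumulating into (ans, nxt)
theorem fStep_inner (rem : List Int) (first : Int)
    (l : List ((Int × Int) × Int)) (hpos : ∀ p ∈ l, 0 < p.1.1)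
    (acc : Int × PySem.Dict (Int × Int) Int) (hnd : acc.2.keys.Nodup)
    (hkp : ∀ p ∈ acc.2.items, 0 < p.1.1) :
    let r := l.foldl
      (fun acc p => fHandle (fHandle acc (p.1.1 - first) (p.1.2 - 1) p.2) p.1.1 p.1.2 p.2) acc
    r.1 + fSum rem r.2
      = acc.1 + fSum rem acc.2 + (l.map (fun p => p.2 * f (first :: rem) p.1.1 p.1.2)).sum
    ∧ r.2.keys.Nodup ∧ (∀ p ∈ r.2.items, 0 < p.1.1) := by
  induction l generalizing acc with
  | nil => exact ⟨by simp, hnd, hkp⟩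
  | cons p t ih =>
    have hp : 0 < p.1.1 := hpos p (List.mem_cons_self)
    obtain ⟨e1, n1, m1⟩ := fHandle_spec rem acc (p.1.1 - first) (p.1.2 - 1) p.2 hnd
    set acc1 := fHandle acc (p.1.1 - first) (p.1.2 - 1) p.2 with hacc1
    obtain ⟨e2, n2, m2⟩ := fHandle_spec rem acc1 p.1.1 p.1.2 p.2 n1
    set acc2 := fHandle acc1 p.1.1 p.1.2 p.2 with hacc2
    have hkp2 : ∀ q ∈ acc2.2.items, 0 < q.1.1 := by
      intro q hq
      rcases m2 q hq with h1 | h2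
      · rcases m1 q h1 with h1' | h2'
        · exact hkp q h1'
        · exact h2'
      · exact h2
    obtain ⟨e3, n3, m3⟩ := ih (fun q hq => hpos q (List.mem_cons_of_mem _ hq)) acc2 n2 hkp2
    refine ⟨?_, n3, m3⟩
    rw [List.foldl_cons, ← hacc2, e3, e2, e1, List.map_cons, List.sum_cons,
      f_pos_cons first rem p.1.1 p.1.2 hp]
    ring

theorem foldl_fStep (c : List Int) (st : Int × PySem.Dict (Int × Int) Int)
    (hnd : st.2.keys.Nodup) (hkp : ∀ p ∈ st.2.items, 0 < p.1.1) :
    (c.foldl (fun st first => fStep first st) st).1 = st.1 + fSum c st.2 := by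
  induction c generalizing st with
  | nil => rw [fSum_nil st.2 hkp]; simp
  | cons first rest ih =>
    obtain ⟨e, n, m⟩ := fStep_inner rest first st.2.items hkp (st.1, PySem.Dict.empty)
      (by simp [PySem.Dict.keys, PySem.Dict.empty]) (by simp [PySem.Dict.empty])
    rw [List.foldl_cons, ih (fStep first st) n m]
    show (fStep first st).1 + fSum rest (fStep first st).2 = _
    rw [show fStep first st = st.2.items.foldl
      (fun acc p => fHandle (fHandle acc (p.1.1 - first) (p.1.2 - 1) p.2) p.1.1 p.1.2 p.2)
      (st.1, PySem.Dict.empty) from rfl, e]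
    simp [fSum, PySem.Dict.empty]

-- ===== VERDICT (by name: the statement is the Claim_ definition above) =====
theorem f_spec : Claim_equal_f := by
  intro c v k _hdom
  unfold Spec_f f_alt
  by_cases h00 : v = 0 ∧ k = 0
  · obtain ⟨rfl, rfl⟩ := h00; simp [f_zero_zero]
  · by_cases hdead : v < 0 ∨ (v = 0 ∧ k ≠ 0)
    · simp [h00, hdead, f_dead c v k hdead]
    · have hv : 0 < v := by
        rcases lt_trichotomy v 0 with h | h | h
        · exact absurd (Or.inl h) hdead
        · subst h
          by_cases hk : k = 0
          · exact absurd ⟨rfl, hk⟩ h00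
          · exact absurd (Or.inr ⟨rfl, hk⟩) hdead
        · exact h
      simp only [h00, hdead, if_false]
      rw [foldl_fStep c (0, PySem.Dict.mk [((v, k), 1)]) (by simp [PySem.Dict.keys])
        (by intro p hp; simp at hp; simp [hp, hv])]
      simp [fSum]
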